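-- pv_equiv track=rewrite | github.com/subha7602/skill_bot_demo | backend/llm_integration.py | find_name_boundaries
-- ===== SOURCE A (Python) =====
-- def find_name_boundaries(query: str, potential_name: str) -> tuple:
--     """
--     Find the precise boundaries of a potential name in a query string.
--     This helps with extracting multi-word names from text and ensures
--     we're replacing the right portion of text when enhancing queries.
--
--     Args:
--         query: The full query text (lowercase)
--         potential_name: A potential name fragment found in the query (lowercase)
--
--     Returns:
--         tuple: (start_position, end_position) of the extended name
--     """
--     if not potential_name or not query:
--         return (-1, -1)
--
--     # Find initial position of the name fragment
--     start_pos = query.find(potential_name)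
--     if start_pos == -1:
--         return (-1, -1)
--
--     end_pos = start_pos + len(potential_name)
--     words = query.split()
--
--     # Find which word the name starts in
--     current_pos = 0
--     start_word_idx = -1
--     for i, word in enumerate(words):
--         if current_pos <= start_pos < current_pos + len(word):
--             start_word_idx = i
--             break
--         current_pos += len(word) + 1  # +1 for the space
--
--     # Find which word the name ends in
--     current_pos = 0
--     end_word_idx = -1
--     for i, word in enumerate(words):
--         if current_pos < end_pos <= current_pos + len(word):
--             end_word_idx = i
--             break
--         current_pos += len(word) + 1  # +1 for the space
--
--     if start_word_idx == -1 or end_word_idx == -1: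
--         return (start_pos, end_pos)
--
--     # Check if surrounding words might be part of the name
--     extended_name_parts = []
--
--     # Check words before the name
--     if start_word_idx > 0:
--         prev_word = words[start_word_idx-1]
--         # Check if previous word starts with capital letter in original query
--         # Since we're working with lowercase strings, we need a different approach
--         # We'll check if this word is commonly a name prefix
--         name_prefixes = ['mr', 'mrs', 'ms', 'dr', 'prof', 'sir', 'madam']
--         if prev_word in name_prefixes or len(prev_word) > 1 and prev_word not in ['the', 'to', 'by', 'in', 'on', 'of', 'for', 'and', 'or']:
--             extended_name_parts.append(prev_word)
--
--     # Add the known name parts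
--     name_word_count = end_word_idx - start_word_idx + 1
--     extended_name_parts.extend(words[start_word_idx:end_word_idx+1])
--
--     # Check words after the name
--     if end_word_idx < len(words)-1:
--         next_word = words[end_word_idx+1]
--         # Check if this might be a last name or suffix
--         name_suffixes = ['jr', 'sr', 'ii', 'iii', 'iv', 'v']
--         if next_word in name_suffixes or len(next_word) > 1 and next_word not in ['to', 'is', 'was', 'from', 'and', 'or', 'with', 'projects', 'skills']:
--             # Only add if we don't already have too many words (unlikely to be a very long name)
--             if name_word_count < 3:
--                 extended_name_parts.append(next_word)
--
--     # Calculate new boundaries based on extended name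
--     if not extended_name_parts:
--         return (start_pos, end_pos)
--
--     extended_name = " ".join(extended_name_parts)
--
--     # Try to find the extended name in the query
--     new_start_pos = query.find(extended_name)
--     if new_start_pos != -1:
--         new_end_pos = new_start_pos + len(extended_name)
--         return (new_start_pos, new_end_pos)
--
--     # If extended name can't be found directly (perhaps due to punctuation or other issues),
--     # just return the original boundaries
--     return (start_pos, end_pos)
-- ===== SOURCE B (Python) =====
-- def find_name_boundaries(query: str, potential_name: str) -> tuple:
--     """Same result as the original, but the word containing a position is found
--     via a precomputed offset table and binary search instead of two scanning loops."""
--     if not potential_name or not query: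
--         return (-1, -1)
--
--     start_pos = query.find(potential_name)
--     if start_pos == -1:
--         return (-1, -1)
--
--     end_pos = start_pos + len(potential_name)
--     words = query.split()
--
--     # Offset table: starts[i] = position of words[i] under the single-space convention.
--     starts = []
--     off = 0
--     for w in words:
--         starts.append(off)
--         off += len(w) + 1
--
--     def locate(pos, left_closed):
--         # word index whose span contains pos: [s, s+len) if left_closed else (s, s+len]
--         key = pos if left_closed else pos - 1
--         # binary search: lo = number of starts <= key
--         lo, hi = 0, len(starts)
--         while lo < hi:
--             mid = (lo + hi) // 2
--             if starts[mid] <= key: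
--                 lo = mid + 1
--             else:
--                 hi = mid
--         if lo == 0:
--             return -1
--         i = lo - 1
--         s, L = starts[i], len(words[i])
--         if left_closed:
--             return i if s <= pos < s + L else -1
--         return i if s < pos <= s + L else -1
--
--     start_word_idx = locate(start_pos, True)
--     end_word_idx = locate(end_pos, False)
--
--     if start_word_idx == -1 or end_word_idx == -1:
--         return (start_pos, end_pos)
--
--     extended_name_parts = []
--
--     if start_word_idx > 0:
--         prev_word = words[start_word_idx-1]
--         name_prefixes = ['mr', 'mrs', 'ms', 'dr', 'prof', 'sir', 'madam']
--         if prev_word in name_prefixes or len(prev_word) > 1 and prev_word not in ['the', 'to', 'by', 'in', 'on', 'of', 'for', 'and', 'or']: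
--             extended_name_parts.append(prev_word)
--
--     name_word_count = end_word_idx - start_word_idx + 1
--     extended_name_parts.extend(words[start_word_idx:end_word_idx+1])
--
--     if end_word_idx < len(words)-1:
--         next_word = words[end_word_idx+1]
--         name_suffixes = ['jr', 'sr', 'ii', 'iii', 'iv', 'v']
--         if next_word in name_suffixes or len(next_word) > 1 and next_word not in ['to', 'is', 'was', 'from', 'and', 'or', 'with', 'projects', 'skills']:
--             if name_word_count < 3:
--                 extended_name_parts.append(next_word)
--
--     if not extended_name_parts:
--         return (start_pos, end_pos)
--
--     extended_name = " ".join(extended_name_parts)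
--
--     new_start_pos = query.find(extended_name)
--     if new_start_pos != -1:
--         return (new_start_pos, new_start_pos + len(extended_name))
--
--     return (start_pos, end_pos)
-- ===== Notes on version B (the rewrite author's own statement) =====
-- stated objective: alternative
-- what changed: The two linear scans that find the word containing start_pos/end_pos are replaced by a one-pass word-offset table plus a single binary-search locator used with both inclusivity conventions; the extension heuristic and final find are kept.
import Mathlib
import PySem

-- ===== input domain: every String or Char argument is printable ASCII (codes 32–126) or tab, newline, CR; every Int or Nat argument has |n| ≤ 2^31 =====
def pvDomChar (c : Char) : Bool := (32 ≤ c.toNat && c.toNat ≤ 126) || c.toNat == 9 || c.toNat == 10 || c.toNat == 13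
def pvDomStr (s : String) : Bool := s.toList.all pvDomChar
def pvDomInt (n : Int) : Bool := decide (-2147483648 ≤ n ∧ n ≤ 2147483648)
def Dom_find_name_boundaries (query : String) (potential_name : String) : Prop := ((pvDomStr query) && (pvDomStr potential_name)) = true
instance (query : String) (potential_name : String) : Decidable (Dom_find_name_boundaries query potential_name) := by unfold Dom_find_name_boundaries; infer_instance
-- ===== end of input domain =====

-- B replaces the two linear word-locating scans by a precomputed offset table plus one binary-search
-- locator used with both inclusivity conventions (objective: alternative); the extension heuristic and
-- the final find are the common tail of both sources, transcribed once as pvFinish.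

-- ===== PORT A =====

-- the common tail of A and B (word-extension heuristic + final query.find), shared verbatim by both sources
def pvFinish (query : String) (words : List String) (start_pos end_pos s_idx e_idx : Int) : Int × Int :=
  if s_idx = -1 ∨ e_idx = -1 then (start_pos, end_pos)
  else
    let parts1 : List String :=
      if s_idx > 0 then
        let prev := PySem.List.pyGetD words (s_idx - 1) ""
        if prev ∈ ["mr", "mrs", "ms", "dr", "prof", "sir", "madam"] ∨
           (PySem.Str.len prev > 1 ∧ prev ∉ ["the", "to", "by", "in", "on", "of", "for", "and", "or"]) then
          [prev]
        else []
      else []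
    let name_word_count := e_idx - s_idx + 1
    let parts2 := parts1 ++ PySem.List.slice words (some s_idx) (some (e_idx + 1))
    let parts3 :=
      if e_idx < (words.length : Int) - 1 then
        let next := PySem.List.pyGetD words (e_idx + 1) ""
        if next ∈ ["jr", "sr", "ii", "iii", "iv", "v"] ∨
           (PySem.Str.len next > 1 ∧ next ∉ ["to", "is", "was", "from", "and", "or", "with", "projects", "skills"]) then
          if name_word_count < 3 then parts2 ++ [next] else parts2
        else parts2
      else parts2
    if parts3 = [] then (start_pos, end_pos)
    else
      let extended := PySem.Str.join " " parts3
      let ns := PySem.Str.find query extended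
      if ns ≠ -1 then (ns, ns + PySem.Str.len extended)
      else (start_pos, end_pos)

-- A's first loop: first word index i with current_pos <= start_pos < current_pos + len(word)
def pvScanStart : List String → Int → Int → Int → Int
  | [], _, _, _ => -1
  | w :: ws, pos, i, cur =>
    if cur ≤ pos ∧ pos < cur + PySem.Str.len w then i
    else pvScanStart ws pos (i + 1) (cur + PySem.Str.len w + 1)

-- A's second loop: first word index i with current_pos < end_pos <= current_pos + len(word)
def pvScanEnd : List String → Int → Int → Int → Int
  | [], _, _, _ => -1
  | w :: ws, pos, i, cur =>
    if cur < pos ∧ pos ≤ cur + PySem.Str.len w then i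
    else pvScanEnd ws pos (i + 1) (cur + PySem.Str.len w + 1)

def find_name_boundaries (query : String) (potential_name : String) : Int × Int :=
  if potential_name = "" ∨ query = "" then (-1, -1)
  else
    let start_pos := PySem.Str.find query potential_name
    if start_pos = -1 then (-1, -1)
    else
      let end_pos := start_pos + PySem.Str.len potential_name
      let words := PySem.Str.split₀ query
      let start_word_idx := pvScanStart words start_pos 0 0
      let end_word_idx := pvScanEnd words end_pos 0 0
      pvFinish query words start_pos end_pos start_word_idx end_word_idx

-- ===== PORT B =====

-- Source B: starts[i] = offset of words[i] under the single-space convention, built in one pass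
def pvStarts (words : List String) : List Int :=
  (words.foldl (fun acc w => (acc.1 ++ [acc.2], acc.2 + PySem.Str.len w + 1)) (([] : List Int), (0 : Int))).1

-- Source B's while-loop: number of entries of starts ≤ key ((lo+hi)//2 on the nonneg lo,hi is Nat division)
def pvBisect (starts : List Int) (key : Int) (lo hi : Nat) : Nat :=
  if lo < hi then
    if PySem.List.pyGetD starts (((lo + hi) / 2 : Nat) : Int) 0 ≤ key then
      pvBisect starts key ((lo + hi) / 2 + 1) hi
    else
      pvBisect starts key lo ((lo + hi) / 2)
  else lo
termination_by hi - lo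
decreasing_by all_goals omega

-- Source B's locate(pos, left_closed)
def pvLocate (words : List String) (starts : List Int) (pos : Int) (leftClosed : Bool) : Int :=
  let key := if leftClosed then pos else pos - 1
  let lo := pvBisect starts key 0 starts.length
  if lo = 0 then -1
  else
    let i := lo - 1
    let s := PySem.List.pyGetD starts (i : Int) 0
    let L := PySem.Str.len (PySem.List.pyGetD words (i : Int) "")
    if leftClosed then (if s ≤ pos ∧ pos < s + L then (i : Int) else -1)
    else (if s < pos ∧ pos ≤ s + L then (i : Int) else -1)

def find_name_boundaries_alt (query : String) (potential_name : String) : Int × Int :=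
  if potential_name = "" ∨ query = "" then (-1, -1)
  else
    let start_pos := PySem.Str.find query potential_name
    if start_pos = -1 then (-1, -1)
    else
      let end_pos := start_pos + PySem.Str.len potential_name
      let words := PySem.Str.split₀ query
      let starts := pvStarts words
      let start_word_idx := pvLocate words starts start_pos true
      let end_word_idx := pvLocate words starts end_pos false
      pvFinish query words start_pos end_pos start_word_idx end_word_idx

-- ===== PRECONDITION & SPEC =====
def Spec_find_name_boundaries (query : String) (potential_name : String) (out : Int × Int) : Prop := out = find_name_boundaries_alt query potential_name
instance (query : String) (potential_name : String) (out : Int × Int) : Decidable (Spec_find_name_boundaries query potential_name out) := by unfold Spec_find_name_boundaries; infer_instance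

-- ===== CLAIM (what is proved, stated in full; the proofs are below) =====
def Claim_equal_find_name_boundaries : Prop := ∀ (query : String) (potential_name : String), Dom_find_name_boundaries query potential_name → Spec_find_name_boundaries query potential_name (find_name_boundaries query potential_name)

-- ===== LEMMAS AND PROOFS =====

-- offset of word j (sum of len+1 of the words before it)
def pvOff : List String → Nat → Int
  | _, 0 => 0
  | [], _ + 1 => 0
  | w :: ws, j + 1 => PySem.Str.len w + 1 + pvOff ws j

def pvLen (ws : List String) (j : Nat) : Int := PySem.Str.len (ws.getD j "")

def pvCond (ws : List String) (c pos : Int) (j : Nat) : Prop :=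
  c + pvOff ws j ≤ pos ∧ pos < c + pvOff ws j + pvLen ws j

def pvStartsFrom : List String → Int → List Int
  | [], _ => []
  | w :: ws, c => c :: pvStartsFrom ws (c + PySem.Str.len w + 1)

theorem pvStrLen_nonneg (w : String) : 0 ≤ PySem.Str.len w := by
  simp [PySem.Str.len_eq]

theorem pvOff_nonneg (ws : List String) (j : Nat) : 0 ≤ pvOff ws j := by
  induction ws generalizing j with
  | nil => cases j <;> simp [pvOff]
  | cons w ws ih =>
    cases j with
    | zero => simp [pvOff]
    | succ k => simp only [pvOff]; have := pvStrLen_nonneg w; have := ih k; omega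

theorem pvOff_succ_le (ws : List String) (j : Nat) : pvOff ws j ≤ pvOff ws (j + 1) := by
  induction ws generalizing j with
  | nil => cases j <;> simp [pvOff]
  | cons w ws ih =>
    cases j with
    | zero => simp only [pvOff]; have := pvStrLen_nonneg w; have := pvOff_nonneg ws 0; omega
    | succ k => simp only [pvOff]; have := ih k; omega

theorem pvOff_mono (ws : List String) {i j : Nat} (h : i ≤ j) : pvOff ws i ≤ pvOff ws j := by
  induction j with
  | zero => have : i = 0 := by omega
            subst this; exact le_refl _
  | succ k ih =>
    rcases Nat.lt_or_ge i (k + 1) with hlt | hge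
    · exact le_trans (ih (by omega)) (pvOff_succ_le ws k)
    · have : i = k + 1 := by omega
      subst this; exact le_refl _

theorem pvOff_succ (ws : List String) (j : Nat) (h : j < ws.length) :
    pvOff ws (j + 1) = pvOff ws j + pvLen ws j + 1 := by
  induction ws generalizing j with
  | nil => simp at h
  | cons w ws ih =>
    cases j with
    | zero => simp [pvOff, pvLen]
    | succ k =>
      simp only [pvOff, pvLen, List.getD_cons_succ]
      have := ih k (by simpa using h)
      simp only [pvLen] at this; omega

theorem pvStarts_go (ws : List String) (l : List Int) (c : Int) :
    (ws.foldl (fun acc w => (acc.1 ++ [acc.2], acc.2 + PySem.Str.len w + 1)) (l, c)).1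
      = l ++ pvStartsFrom ws c := by
  induction ws generalizing l c with
  | nil => simp [pvStartsFrom]
  | cons w ws ih => rw [List.foldl_cons, ih]; simp [pvStartsFrom]

theorem pvStarts_eq (ws : List String) : pvStarts ws = pvStartsFrom ws 0 := by
  simpa using pvStarts_go ws [] 0

theorem pvStartsFrom_length (ws : List String) (c : Int) : (pvStartsFrom ws c).length = ws.length := by
  induction ws generalizing c with
  | nil => rfl
  | cons w ws ih => simp [pvStartsFrom, ih]

theorem pvStartsFrom_getD (ws : List String) (c : Int) (j : Nat) (h : j < ws.length) :
    (pvStartsFrom ws c).getD j 0 = c + pvOff ws j := by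
  induction ws generalizing c j with
  | nil => simp at h
  | cons w ws ih =>
    cases j with
    | zero => simp [pvStartsFrom, pvOff]
    | succ k =>
      simp only [pvStartsFrom, pvOff, List.getD_cons_succ]
      rw [ih _ k (by simpa using h)]; ring

theorem pvBisect_spec (starts : List Int) (key : Int)
    (hmono : ∀ i j : Nat, i ≤ j → j < starts.length → starts.getD i 0 ≤ starts.getD j 0) :
    ∀ lo hi : Nat, lo ≤ hi → hi ≤ starts.length →
    (∀ j, j < lo → starts.getD j 0 ≤ key) →
    (∀ j, hi ≤ j → j < starts.length → key < starts.getD j 0) →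
    lo ≤ pvBisect starts key lo hi ∧ pvBisect starts key lo hi ≤ hi ∧
    (∀ j, j < pvBisect starts key lo hi → starts.getD j 0 ≤ key) ∧
    (∀ j, pvBisect starts key lo hi ≤ j → j < starts.length → key < starts.getD j 0) := by
  intro lo hi
  fun_induction pvBisect starts key lo hi with
  | case1 lo hi hlt hle ih =>
    intro _ hhi hlow hhigh
    have hmidlt : (lo + hi) / 2 < starts.length := by omega
    have h1 : ∀ j, j < (lo + hi) / 2 + 1 → starts.getD j 0 ≤ key := by
      intro j hj
      have hle' : starts.getD ((lo + hi) / 2) 0 ≤ key := by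
        simpa only [PySem.List.pyGetD_natCast] using hle
      calc starts.getD j 0 ≤ starts.getD ((lo + hi) / 2) 0 := hmono _ _ (by omega) hmidlt
        _ ≤ key := hle'
    have := ih (by omega) hhi h1 hhigh
    exact ⟨by omega, this.2.1, this.2.2.1, this.2.2.2⟩
  | case2 lo hi hlt hgt ih =>
    intro _ hhi hlow hhigh
    have hmidlt : (lo + hi) / 2 < starts.length := by omega
    have hkey : key < starts.getD ((lo + hi) / 2) 0 := by
      simp only [PySem.List.pyGetD_natCast] at hgt; omega
    have h2 : ∀ j, (lo + hi) / 2 ≤ j → j < starts.length → key < starts.getD j 0 := by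
      intro j hj hjl
      exact lt_of_lt_of_le hkey (hmono _ _ hj hjl)
    have := ih (by omega) (by omega) hlow h2
    exact ⟨this.1, by omega, this.2.2.1, this.2.2.2⟩
  | case3 lo hi hnlt =>
    intro hle hhi hlow hhigh
    exact ⟨le_refl _, by omega, hlow, fun j hj hjl => hhigh j (by omega) hjl⟩

theorem pvScan_spec (ws : List String) : ∀ (pos i c : Int),
    (pvScanStart ws pos i c = -1 ∧ ∀ j, j < ws.length → ¬ pvCond ws c pos j) ∨
    (∃ j : Nat, j < ws.length ∧ pvCond ws c pos j ∧ pvScanStart ws pos i c = i + j) := by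
  induction ws with
  | nil => intro pos i c; exact Or.inl ⟨rfl, by intro j hj; simp at hj⟩
  | cons w ws ih =>
    intro pos i c
    by_cases h0 : c ≤ pos ∧ pos < c + PySem.Str.len w
    · refine Or.inr ⟨0, by simp, ?_, ?_⟩
      · simpa [pvCond, pvOff, pvLen] using h0
      · simp only [pvScanStart]; rw [if_pos h0]; simp
    · have hrec : pvScanStart (w :: ws) pos i c = pvScanStart ws pos (i + 1) (c + PySem.Str.len w + 1) := by
        simp only [pvScanStart]; rw [if_neg h0]
      have hcond : ∀ j : Nat, pvCond ws (c + PySem.Str.len w + 1) pos j ↔ pvCond (w :: ws) c pos (j + 1) := by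
        intro j
        simp only [pvCond, pvOff, pvLen, List.getD_cons_succ]
        constructor <;> intro hc <;> exact ⟨by omega, by omega⟩
      rcases ih pos (i + 1) (c + PySem.Str.len w + 1) with ⟨hres, hall⟩ | ⟨j, hj, hc, hres⟩
      · refine Or.inl ⟨by rw [hrec]; exact hres, ?_⟩
        intro j hj
        cases j with
        | zero => simpa [pvCond, pvOff, pvLen] using h0
        | succ k => exact fun hc => hall k (by simpa using hj) ((hcond k).2 hc)
      · refine Or.inr ⟨j + 1, by simpa using hj, (hcond j).1 hc, ?_⟩
        rw [hrec, hres]; push_cast; ring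

-- key lemma: A's start scan = B's table + binary-search locator
theorem pvScanStart_eq_locate (ws : List String) (pos : Int) :
    pvScanStart ws pos 0 0 = pvLocate ws (pvStarts ws) pos true := by
  have hlen : (pvStarts ws).length = ws.length := by rw [pvStarts_eq]; exact pvStartsFrom_length ws 0
  have hgetD : ∀ j, j < ws.length → (pvStarts ws).getD j 0 = pvOff ws j := by
    intro j hj; rw [pvStarts_eq, pvStartsFrom_getD ws 0 j hj]; ring
  have hmono : ∀ i j : Nat, i ≤ j → j < (pvStarts ws).length → (pvStarts ws).getD i 0 ≤ (pvStarts ws).getD j 0 := by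
    intro i j hij hj
    rw [hlen] at hj
    rw [hgetD i (by omega), hgetD j hj]
    exact pvOff_mono ws hij
  have hbs := pvBisect_spec (pvStarts ws) pos hmono 0 (pvStarts ws).length (by omega) (le_refl _)
    (by intro j hj; omega) (by intro j hj hjl; omega)
  set r := pvBisect (pvStarts ws) pos 0 (pvStarts ws).length with hr
  obtain ⟨-, hrle, hlow, hhigh⟩ := hbs
  rcases pvScan_spec ws pos 0 0 with ⟨hres, hall⟩ | ⟨j, hj, hc, hres⟩
  · rw [hres]
    simp only [pvLocate, if_true, ← hr]
    by_cases hr0 : r = 0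
    · rw [if_pos hr0]
    · rw [if_neg hr0]
      have hi : r - 1 < ws.length := by omega
      have hs : PySem.List.pyGetD (pvStarts ws) ((r - 1 : Nat) : Int) 0 = pvOff ws (r - 1) := by
        rw [PySem.List.pyGetD_natCast]; exact hgetD _ hi
      have hL : PySem.Str.len (PySem.List.pyGetD ws ((r - 1 : Nat) : Int) "") = pvLen ws (r - 1) := by
        rw [PySem.List.pyGetD_natCast]; rfl
      have hsle : pvOff ws (r - 1) ≤ pos := by
        have := hlow (r - 1) (by omega); rwa [hgetD _ hi] at this
      have hnc := hall (r - 1) hi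
      simp only [pvCond] at hnc
      rw [if_neg]
      intro hcc
      rw [hs, hL] at hcc
      exact hnc ⟨by omega, by omega⟩
  · -- scan found word j; show r = j + 1 and the locate check succeeds
    have hsj : (pvStarts ws).getD j 0 = pvOff ws j := hgetD j hj
    simp only [pvCond] at hc
    have hjr : j < r := by
      by_contra hnr
      have := hhigh j (by omega) (by omega)
      rw [hsj] at this; omega
    have hrj : r ≤ j + 1 := by
      by_contra hnr
      have hj1 : j + 1 < ws.length := by omega
      have := hlow (j + 1) (by omega)
      rw [hgetD (j + 1) hj1, pvOff_succ ws j hj] at this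
      omega
    have hrval : r = j + 1 := by omega
    rw [hres]
    simp only [pvLocate, if_true, ← hr, hrval]
    rw [if_neg (by omega)]
    have hsimp : j + 1 - 1 = j := by omega
    rw [hsimp]
    have hS : PySem.List.pyGetD (pvStarts ws) ((j : Nat) : Int) 0 = pvOff ws j := by
      rw [PySem.List.pyGetD_natCast]; exact hgetD j hj
    have hL : PySem.Str.len (PySem.List.pyGetD ws ((j : Nat) : Int) "") = pvLen ws j := by
      rw [PySem.List.pyGetD_natCast]; rfl
    rw [if_pos]
    · omega
    · rw [hS, hL]
      exact ⟨by omega, by omega⟩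

theorem pvScanEnd_eq_shift (ws : List String) : ∀ (pos i c : Int),
    pvScanEnd ws pos i c = pvScanStart ws (pos - 1) i c := by
  induction ws with
  | nil => intro pos i c; rfl
  | cons w ws ih =>
    intro pos i c
    have hiff : (c < pos ∧ pos ≤ c + PySem.Str.len w) ↔ (c ≤ pos - 1 ∧ pos - 1 < c + PySem.Str.len w) := by omega
    by_cases h : c < pos ∧ pos ≤ c + PySem.Str.len w
    · rw [pvScanEnd, pvScanStart, if_pos h, if_pos (hiff.1 h)]
    · rw [pvScanEnd, pvScanStart, if_neg h, if_neg ((not_congr hiff).1 h)]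
      exact ih (pos) (i + 1) (c + PySem.Str.len w + 1)

theorem pvLocate_false_eq (ws : List String) (starts : List Int) (pos : Int) :
    pvLocate ws starts pos false = pvLocate ws starts (pos - 1) true := by
  simp only [pvLocate, Bool.false_eq_true, if_false, if_true]
  by_cases h0 : pvBisect starts (pos - 1) 0 starts.length = 0
  · rw [if_pos h0, if_pos h0]
  · rw [if_neg h0, if_neg h0]
    set i := pvBisect starts (pos - 1) 0 starts.length - 1
    set s := PySem.List.pyGetD starts (i : Int) 0
    set L := PySem.Str.len (PySem.List.pyGetD ws (i : Int) "")
    have hiff : (s < pos ∧ pos ≤ s + L) ↔ (s ≤ pos - 1 ∧ pos - 1 < s + L) := by omega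
    by_cases h : s < pos ∧ pos ≤ s + L
    · rw [if_pos h, if_pos (hiff.1 h)]
    · rw [if_neg h, if_neg ((not_congr hiff).1 h)]

theorem pvScanEnd_eq_locate (ws : List String) (pos : Int) :
    pvScanEnd ws pos 0 0 = pvLocate ws (pvStarts ws) pos false := by
  rw [pvScanEnd_eq_shift, pvScanStart_eq_locate, pvLocate_false_eq]

-- ===== VERDICT (by name: the statement is the Claim_ definition above) =====
theorem find_name_boundaries_spec : Claim_equal_find_name_boundaries := by
  intro query potential_name _
  show find_name_boundaries query potential_name = find_name_boundaries_alt query potential_name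
  simp only [find_name_boundaries, find_name_boundaries_alt,
    pvScanStart_eq_locate, pvScanEnd_eq_locate]
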